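-- pv_equiv track=rewrite | github.com/auroraingebrigtsen/bayesian-structure-learning | partial_order_approach.py | predecessors
-- ===== SOURCE A (Python) =====
-- from typing import List, Dict, Tuple, FrozenSet, Iterable, Set
--
-- Edge = Tuple[str, str]
--
-- def predecessors(M: Set[str], P: Set[Edge]) -> Dict[str, Set[str]]:
--     """
--     Function to compute the predecessors of each element in M.
--     A predecessor of v is any u with (u,v) in P.
--
--     Returns a map from each element of M to its set of predecessors.
--     """
--     pred: Dict[str, Set[str]] = {u: set() for u in M}
--     for u, v in P:
--         if u == v:
--             continue
--         pred.setdefault(u, set())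
--         pred.setdefault(v, set()).add(u)
--     return pred
-- ===== SOURCE B (Python) =====
-- def predecessors(M, P):
--     # vertex set: elements of M, then endpoints of non-self edges, first occurrence order
--     nodes = dict.fromkeys(M)
--     for u, v in P:
--         if u != v:
--             nodes.setdefault(u)
--             nodes.setdefault(v)
--     # per-node rescan of the edges
--     return {x: {u for u, v in P if v == x and u != v} for x in nodes}
-- ===== Notes on version B (the rewrite author's own statement) =====
-- stated objective: alternative
-- what changed: A threads one mutable dict-of-sets through a single edge pass with setdefault; B first computes the ordered vertex set and then builds each node's predecessor set by an independent rescan of the edge list (a comprehension), no shared mutable dict.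
import Mathlib
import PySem

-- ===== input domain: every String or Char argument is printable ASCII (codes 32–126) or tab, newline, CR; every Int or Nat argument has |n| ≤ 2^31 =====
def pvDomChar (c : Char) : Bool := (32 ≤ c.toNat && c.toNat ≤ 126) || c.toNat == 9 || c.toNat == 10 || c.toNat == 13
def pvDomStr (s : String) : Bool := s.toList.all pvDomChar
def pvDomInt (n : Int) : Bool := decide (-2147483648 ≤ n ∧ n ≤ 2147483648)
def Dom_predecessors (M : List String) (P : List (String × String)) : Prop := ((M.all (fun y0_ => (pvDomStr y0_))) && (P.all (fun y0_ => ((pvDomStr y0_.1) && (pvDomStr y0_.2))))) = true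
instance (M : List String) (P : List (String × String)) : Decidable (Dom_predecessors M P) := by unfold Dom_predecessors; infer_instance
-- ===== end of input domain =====

-- B restructures A: A threads one mutable dict-of-sets through a single edge pass (setdefault);
-- B computes the ordered vertex set first and then rescans the edge list once per node ("alternative", not faster).

-- ===== PORT A =====
-- loop body of A's 'for u, v in P' (skip self-loops, setdefault both endpoints, add u to pred[v])
def predStepA (d : PySem.Dict String (PySem.Set String)) (uv : String × String) :
    PySem.Dict String (PySem.Set String) :=
  if uv.1 = uv.2 then d
  else ((d.setdefault uv.1 PySem.Set.empty).setdefault uv.2 PySem.Set.empty).modify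
        uv.2 PySem.Set.empty (fun s => PySem.Set.add s uv.1)

def predecessors (M : List String) (P : List (String × String)) : List (String × List String) :=
  (P.foldl predStepA
    (M.foldl (fun d u => d.insert u PySem.Set.empty) PySem.Dict.empty)).items  -- {u: set() for u in M}

-- ===== PORT B =====
-- node-collection step: add both endpoints of a non-self edge
def nodeStepB (ns : PySem.Set String) (uv : String × String) : PySem.Set String :=
  if uv.1 = uv.2 then ns else PySem.Set.add (PySem.Set.add ns uv.1) uv.2

-- set-comprehension step: {u for u, v in P if v == x and u != v}
def predStepB (x : String) (s : PySem.Set String) (uv : String × String) : PySem.Set String :=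
  if uv.2 = x ∧ uv.1 ≠ uv.2 then PySem.Set.add s uv.1 else s

def predecessors_alt (M : List String) (P : List (String × String)) : List (String × List String) :=
  (P.foldl nodeStepB (PySem.Set.ofList M)).map
    (fun x => (x, P.foldl (predStepB x) PySem.Set.empty))

-- ===== PRECONDITION & SPEC =====
def Spec_predecessors (M : List String) (P : List (String × String)) (out : List (String × List String)) : Prop := out = predecessors_alt M P
instance (M : List String) (P : List (String × String)) (out : List (String × List String)) : Decidable (Spec_predecessors M P out) := by unfold Spec_predecessors; infer_instance

-- ===== CLAIM (what is proved, stated in full; the proofs are below) =====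
def Claim_equal_predecessors : Prop := ∀ (M : List String) (P : List (String × String)), Dom_predecessors M P → Spec_predecessors M P (predecessors M P)

-- ===== LEMMAS AND PROOFS =====

-- A's dict after processing the edge prefix Q, expressed through B's pieces
def predState (M : List String) (Q : List (String × String)) :
    PySem.Dict String (PySem.Set String) :=
  PySem.Dict.mk ((Q.foldl nodeStepB (PySem.Set.ofList M)).map
    (fun k => (k, Q.foldl (predStepB k) PySem.Set.empty)))

theorem mem_foldl_nodeStepB_of_mem {x : String} (Q : List (String × String))
    (ns : PySem.Set String) (h : x ∈ ns) : x ∈ Q.foldl nodeStepB ns := by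
  induction Q generalizing ns with
  | nil => exact h
  | cons e t ih =>
    rw [List.foldl_cons]
    refine ih _ ?_
    show x ∈ nodeStepB ns e
    unfold nodeStepB
    split
    · exact h
    · exact (PySem.Set.mem_add _ _ _).mpr (Or.inl ((PySem.Set.mem_add _ _ _).mpr (Or.inl h)))

theorem endpoint_mem_foldl_nodeStepB {x : String} (Q : List (String × String))
    (ns : PySem.Set String) (e : String × String) (he : e ∈ Q) (hne : e.1 ≠ e.2)
    (hx : x = e.1 ∨ x = e.2) : x ∈ Q.foldl nodeStepB ns := by
  induction Q generalizing ns with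
  | nil => cases he
  | cons f t ih =>
    rw [List.foldl_cons]
    rcases List.mem_cons.mp he with rfl | hmem
    · refine mem_foldl_nodeStepB_of_mem _ _ ?_
      show x ∈ nodeStepB ns e
      unfold nodeStepB
      rw [if_neg hne]
      rcases hx with rfl | rfl
      · exact (PySem.Set.mem_add _ _ _).mpr (Or.inl ((PySem.Set.mem_add _ _ _).mpr (Or.inr rfl)))
      · exact (PySem.Set.mem_add _ _ _).mpr (Or.inr rfl)
    · exact ih _ hmem

theorem nodup_foldl_nodeStepB (Q : List (String × String)) (ns : PySem.Set String)
    (h : ns.Nodup) : (Q.foldl nodeStepB ns).Nodup := by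
  induction Q generalizing ns with
  | nil => exact h
  | cons e t ih =>
    rw [List.foldl_cons]
    refine ih _ ?_
    show (nodeStepB ns e).Nodup
    unfold nodeStepB
    split
    · exact h
    · exact PySem.Set.nodup_add _ _ (PySem.Set.nodup_add _ _ h)

theorem foldl_predStepB_of_no_edge {x : String} (Q : List (String × String))
    (s : PySem.Set String) (h : ∀ e ∈ Q, ¬(e.2 = x ∧ e.1 ≠ e.2)) :
    Q.foldl (predStepB x) s = s := by
  induction Q generalizing s with
  | nil => rfl
  | cons e t ih =>
    have he : predStepB x s e = s := by unfold predStepB; rw [if_neg (h e (List.mem_cons_self))]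
    rw [List.foldl_cons, he]
    exact ih _ (fun f hf => h f (List.mem_cons_of_mem _ hf))

theorem foldl_predStepB_empty_of_not_key {x : String} (M : List String)
    (Q : List (String × String)) (hx : x ∉ Q.foldl nodeStepB (PySem.Set.ofList M)) :
    Q.foldl (predStepB x) PySem.Set.empty = PySem.Set.empty := by
  refine foldl_predStepB_of_no_edge Q _ (fun e he hc => ?_)
  exact hx (endpoint_mem_foldl_nodeStepB Q _ e he hc.2 (Or.inr hc.1.symm))

theorem contains_mk_map {K : List String} {g : String → PySem.Set String} {x : String} :
    (PySem.Dict.mk (K.map (fun k => (k, g k)))).contains x = K.contains x := by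
  simp [PySem.Dict.contains, List.any_map, Function.comp_def, List.any_beq']

-- setdefault on a dict of shape 'K.map (fun k => (k, g k))' adds the key like Set.add,
-- provided g gives the default on missing keys
theorem setdefault_mk_map {K : List String} {g : String → PySem.Set String} {x : String}
    (hx : x ∉ K → g x = PySem.Set.empty) :
    (PySem.Dict.mk (K.map (fun k => (k, g k)))).setdefault x PySem.Set.empty =
      PySem.Dict.mk ((PySem.Set.add K x).map (fun k => (k, g k))) := by
  by_cases hmem : x ∈ K
  · have hc : (PySem.Dict.mk (K.map (fun k => (k, g k)))).contains x = true := by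
      rw [contains_mk_map]; exact List.contains_iff_mem.mpr hmem
    rw [PySem.Dict.setdefault_of_contains _ _ hc]
    have : PySem.Set.add K x = K := by
      unfold PySem.Set.add
      rw [if_pos]
      exact List.contains_iff_mem.mpr hmem
    rw [this]
  · have hc : (PySem.Dict.mk (K.map (fun k => (k, g k)))).contains x = false := by
      rw [contains_mk_map]; simpa using hmem
    rw [PySem.Dict.setdefault_of_not_contains _ _ hc]
    have hadd : PySem.Set.add K x = K ++ [x] := by
      unfold PySem.Set.add
      rw [if_neg]
      simpa using hmem
    rw [PySem.Dict.insert, if_neg (by simp [hc]), hadd]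
    simp [hx hmem]

theorem modify_mk_map {K : List String} {g : String → PySem.Set String} {x u : String}
    (hnd : K.Nodup) (hmem : x ∈ K) :
    (PySem.Dict.mk (K.map (fun k => (k, g k)))).modify x PySem.Set.empty
        (fun s => PySem.Set.add s u) =
      PySem.Dict.mk (K.map (fun k => (k, if x = k then PySem.Set.add (g k) u else g k))) := by
  have hget : (PySem.Dict.mk (K.map (fun k => (k, g k)))).getD x PySem.Set.empty = g x := by
    refine PySem.Dict.getD_of_mem_items (PySem.Dict.mk (K.map (fun k => (k, g k)))) (List.mem_map.mpr ⟨x, hmem, rfl⟩) ?_ _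
    simpa [PySem.Dict.keys_mk, List.map_map, Function.comp_def] using hnd
  have hc : (PySem.Dict.mk (K.map (fun k => (k, g k)))).contains x = true := by
    rw [contains_mk_map]; exact List.contains_iff_mem.mpr hmem
  rw [PySem.Dict.modify, hget, PySem.Dict.insert, if_pos hc]
  congr 1
  rw [List.map_map]
  refine List.map_congr_left (fun k _ => ?_)
  by_cases hk : x = k
  · subst hk; simp
  · simp [Ne.symm hk, hk]

theorem predStepA_state (M : List String) (Q : List (String × String)) (e : String × String) :
    predStepA (predState M Q) e = predState M (Q ++ [e]) := by
  obtain ⟨u, v⟩ := e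
  unfold predState predStepA
  by_cases huv : u = v
  · rw [if_pos huv]
    simp only [List.foldl_append, List.foldl_cons, List.foldl_nil]
    have hns : nodeStepB (Q.foldl nodeStepB (PySem.Set.ofList M)) (u, v) =
        Q.foldl nodeStepB (PySem.Set.ofList M) := by unfold nodeStepB; rw [if_pos huv]
    rw [hns]
    congr 1
    refine List.map_congr_left (fun k _ => ?_)
    have : predStepB k (Q.foldl (predStepB k) PySem.Set.empty) (u, v) =
        Q.foldl (predStepB k) PySem.Set.empty := by
      unfold predStepB
      rw [if_neg (by simp [huv])]
    rw [this]
  · rw [if_neg huv]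
    set K := Q.foldl nodeStepB (PySem.Set.ofList M) with hK
    set g : String → PySem.Set String := fun k => Q.foldl (predStepB k) PySem.Set.empty with hg
    have h1 := setdefault_mk_map (K := K) (g := g) (x := u)
      (fun h => foldl_predStepB_empty_of_not_key M Q h)
    have h2 := setdefault_mk_map (K := PySem.Set.add K u) (g := g) (x := v)
      (fun h => foldl_predStepB_empty_of_not_key M Q
        (fun hv => h ((PySem.Set.mem_add _ _ _).mpr (Or.inl hv))))
    have hnd : (PySem.Set.add (PySem.Set.add K u) v).Nodup :=
      PySem.Set.nodup_add _ _ (PySem.Set.nodup_add _ _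
        (nodup_foldl_nodeStepB Q _ (PySem.Set.nodup_ofList M)))
    have hmemv : v ∈ PySem.Set.add (PySem.Set.add K u) v :=
      (PySem.Set.mem_add _ _ _).mpr (Or.inr rfl)
    rw [h1, h2, modify_mk_map hnd hmemv]
    simp only [List.foldl_append, List.foldl_cons, List.foldl_nil]
    have hns : nodeStepB K (u, v) = PySem.Set.add (PySem.Set.add K u) v := by
      unfold nodeStepB; rw [if_neg huv]
    rw [hns]
    congr 1
    refine List.map_congr_left (fun k _ => ?_)
    have : predStepB k (g k) (u, v) = if v = k then PySem.Set.add (g k) u else g k := by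
      unfold predStepB
      by_cases hvk : v = k
      · rw [if_pos ⟨hvk, huv⟩, if_pos hvk]
      · rw [if_neg (by simp [hvk]), if_neg hvk]
    rw [this]

theorem foldl_predStepA_state (M : List String) (R Q : List (String × String)) :
    R.foldl predStepA (predState M Q) = predState M (Q ++ R) := by
  induction R generalizing Q with
  | nil => rw [List.append_nil]; rfl
  | cons e t ih =>
    rw [List.foldl_cons, predStepA_state, ih, List.append_assoc]
    rfl

theorem insert_const_foldl (L K : List String) :
    L.foldl (fun d u => d.insert u PySem.Set.empty)
      (PySem.Dict.mk (K.map (fun k => (k, (PySem.Set.empty : PySem.Set String))))) =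
    PySem.Dict.mk ((L.foldl PySem.Set.add K).map
      (fun k => (k, (PySem.Set.empty : PySem.Set String)))) := by
  induction L generalizing K with
  | nil => rfl
  | cons x t ih =>
    rw [List.foldl_cons, List.foldl_cons, ← ih]
    congr 1
    unfold PySem.Dict.insert
    by_cases hmem : x ∈ K
    · have hc : (PySem.Dict.mk (K.map (fun k => (k, (PySem.Set.empty : PySem.Set String))))).contains x = true := by
        rw [contains_mk_map]; exact List.contains_iff_mem.mpr hmem
      rw [if_pos hc]
      have hadd : PySem.Set.add K x = K := by
        unfold PySem.Set.add
        rw [if_pos]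
        exact List.contains_iff_mem.mpr hmem
      rw [hadd]
      congr 1
      rw [List.map_map]
      refine (List.map_congr_left (fun k _ => ?_)).symm
      by_cases hk : k = x
      · subst hk; simp
      · simp [hk]
    · have hc : (PySem.Dict.mk (K.map (fun k => (k, (PySem.Set.empty : PySem.Set String))))).contains x = false := by
        rw [contains_mk_map]; simpa using hmem
      rw [if_neg (by rw [hc]; simp)]
      have hadd : PySem.Set.add K x = K ++ [x] := by
        unfold PySem.Set.add
        rw [if_neg]
        simpa using hmem
      rw [hadd]
      simp

theorem init_dict_eq (M : List String) :
    M.foldl (fun d u => d.insert u PySem.Set.empty) PySem.Dict.empty = predState M [] := by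
  unfold predState
  simp only [List.foldl_nil]
  have := insert_const_foldl M []
  simpa [PySem.Set.ofList_eq_foldl, PySem.Dict.empty] using this

-- ===== VERDICT (by name: the statement is the Claim_ definition above) =====
theorem predecessors_spec : Claim_equal_predecessors := by
  intro M P _
  unfold Spec_predecessors predecessors predecessors_alt
  rw [init_dict_eq, foldl_predStepA_state, List.nil_append]
  rfl
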